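-- pv_equiv track=rewrite | github.com/tjdgns1284/Algo-CS | csagain/0907/newid.py | solution
-- ===== SOURCE A (Python) =====
-- def solution(new_id):
--     queue=[]
--     last =1
--     for x in new_id:
--         n= ord(x)
--         if 97<=n<=122 or n in [45,95]:
--             queue.append(x)
--         elif n in [48,49,50,51,52,53,54,55,56,57]:
--             queue.append(x)
--         elif 65<=n<=90:
--             x= chr(n+32)
--             queue.append(x)
--         elif n==46 and last:
--             queue.append(x)
--             last = 0
--             continue
--         else:
--             continue
--         last =1
--     if queue:
--         if last==0:
--             queue.pop()
--     if queue:
--         if queue[0]=='.':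
--             queue.pop(0)
--     if queue==[]:
--         queue.append('a')
--
--     if len(queue)>=16:
--         queue= queue[:15]
--         if queue[14]=='.':
--             queue.pop()
--     while len(queue)<3:
--         queue.append(queue[-1])
--
--
--
--     answer=''.join(queue)
--     return answer
-- ===== SOURCE B (Python) =====
-- def solution(new_id):
--     s = ''.join(c for c in new_id.lower()
--                 if 'a' <= c <= 'z' or '0' <= c <= '9' or c in '-_.')
--     s = ''.join(c for c, p in zip(s, '\0' + s) if c != '.' or p != '.')
--     s = s.strip('.') or 'a'
--     s = s[:15].rstrip('.')
--     return s + s[-1] * (3 - len(s))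
-- ===== Notes on version B (the rewrite author's own statement) =====
-- stated objective: idiomatic
-- what changed: A's single stateful character loop (queue plus a last-appended-dot flag, followed by conditional pops) is replaced by a pipeline of whole-string passes: lowercase+filter comprehension, a zip-with-predecessor comprehension that collapses dot runs, strip('.')/rstrip('.') calls, a slice, and arithmetic padding.
import Mathlib
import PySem

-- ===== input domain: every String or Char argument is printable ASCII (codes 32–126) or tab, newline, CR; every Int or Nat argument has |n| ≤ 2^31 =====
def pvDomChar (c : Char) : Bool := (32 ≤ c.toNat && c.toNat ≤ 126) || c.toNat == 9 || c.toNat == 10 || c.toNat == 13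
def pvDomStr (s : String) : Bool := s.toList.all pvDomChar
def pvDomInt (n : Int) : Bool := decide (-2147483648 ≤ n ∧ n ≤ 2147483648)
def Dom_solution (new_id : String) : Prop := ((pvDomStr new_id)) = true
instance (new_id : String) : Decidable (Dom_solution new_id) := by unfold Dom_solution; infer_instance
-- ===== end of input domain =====

-- B replaces A's single stateful scan (queue + last-appended-dot flag) by a pipeline of
-- whole-string passes (lowercase+filter, zip-with-predecessor dot collapse, strips of dots
-- at both ends, slice, arithmetic padding); equal return value on every input (idiomatic).


-- ===== PORT A =====
-- one step of A's for-loop; state = (queue, last)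
def solStep (st : List Char × Int) (x : Char) : List Char × Int :=
  let queue := st.1
  let last := st.2
  let n := x.toNat
  if (97 ≤ n ∧ n ≤ 122) ∨ n = 45 ∨ n = 95 then (queue ++ [x], 1)
  else if n ∈ [48, 49, 50, 51, 52, 53, 54, 55, 56, 57] then (queue ++ [x], 1)
  else if 65 ≤ n ∧ n ≤ 90 then (queue ++ [Char.ofNat (n + 32)], 1)
  else if n = 46 ∧ last ≠ 0 then (queue ++ [x], 0)
  else (queue, last)

-- A's trailing `while len(queue)<3: queue.append(queue[-1])` (queue is never empty there;
-- the `none` branch only makes the recursion total)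
def padLoop (q : List Char) : List Char :=
  if q.length < 3 then
    match q.getLast? with
    | some c => padLoop (q ++ [c])
    | none => q
  else q
termination_by 3 - q.length
decreasing_by simp; omega

def solution (new_id : String) : String :=
  let r := new_id.toList.foldl solStep ([], 1)
  let queue := r.1
  let last := r.2
  let queue := if queue ≠ [] ∧ last = 0 then queue.dropLast else queue
  let queue := if queue.head? = some '.' then queue.tail else queue
  let queue := if queue = [] then ['a'] else queue
  let queue :=
    if 16 ≤ queue.length then
      let q := queue.take 15
      if PySem.List.pyGet? q (14 : Int) = some '.' then q.dropLast else q
    else queue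
  String.mk (padLoop queue)

-- ===== PORT B =====
-- `'a' <= c <= 'z' or '0' <= c <= '9' or c in '-_.'`
def bKeep (c : Char) : Bool := ('a' ≤ c && c ≤ 'z') || ('0' ≤ c && c ≤ '9') || (c == '-' || c == '_' || c == '.')

def isDot (c : Char) : Bool := c == '.'

def solution_alt (new_id : String) : String :=
  let s := (PySem.Str.lower new_id).toList.filter bKeep
  -- ''.join(c for c, p in zip(s, '\0' + s) if c != '.' or p != '.')
  let s := ((s.zip (Char.ofNat 0 :: s)).filter (fun cp => !(isDot cp.1) || !(isDot cp.2))).map Prod.fst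
  -- s.strip('.')  (strip of the char set {'.'}, ported by hand: drop dots from both ends; exact)
  let s := ((s.dropWhile isDot).reverse.dropWhile isDot).reverse
  let s := if s = [] then ['a'] else s
  -- s[:15].rstrip('.')
  let s := ((s.take 15).reverse.dropWhile isDot).reverse
  -- s + s[-1] * (3 - len(s))  (s is nonempty there; the `none` branch only makes the port total)
  String.mk (s ++ (match s.getLast? with | some c => List.replicate (3 - s.length) c | none => []))

-- ===== PRECONDITION & SPEC =====
def Spec_solution (new_id : String) (out : String) : Prop := out = solution_alt new_id
instance (new_id : String) (out : String) : Decidable (Spec_solution new_id out) := by unfold Spec_solution; infer_instance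

-- ===== CLAIM (what is proved, stated in full; the proofs are below) =====
def Claim_equal_solution : Prop := ∀ (new_id : String), Dom_solution new_id → Spec_solution new_id (solution new_id)

-- ===== LEMMAS AND PROOFS =====

-- per-character normalisation both programs perform (keep / lowercase / drop)
def normC (x : Char) : Option Char :=
  if (97 ≤ x.toNat ∧ x.toNat ≤ 122) ∨ x.toNat = 45 ∨ x.toNat = 95 then some x
  else if x.toNat ∈ [48, 49, 50, 51, 52, 53, 54, 55, 56, 57] then some x
  else if 65 ≤ x.toNat ∧ x.toNat ≤ 90 then some (Char.ofNat (x.toNat + 32))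
  else if x.toNat = 46 then some x
  else none

-- canonical "append unless it would create '..'" step
def dedStep (acc : List Char) (c : Char) : List Char :=
  if c = '.' ∧ acc.getLast? = some '.' then acc else acc ++ [c]

def flagOf (q : List Char) : Int := if q.getLast? = some '.' then 0 else 1

def NoDD (l : List Char) : Prop := List.IsChain (fun a b => ¬(a = '.' ∧ b = '.')) l

theorem char_eq_dot_of_toNat (c : Char) (h : c.toNat = 46) : c = '.' := by
  have := Char.ofNat_toNat c
  rw [h] at this
  exact this.symm

theorem charLe (d c : Char) : (d ≤ c) ↔ d.toNat ≤ c.toNat := Iff.rfl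

theorem char_eq_iff_toNat (c d : Char) : c = d ↔ c.toNat = d.toNat := by
  constructor
  · rintro rfl; rfl
  · intro h
    have h1 := Char.ofNat_toNat c
    rw [h, Char.ofNat_toNat] at h1
    exact h1.symm

theorem stepA (q : List Char) (c : Char) :
    solStep (q, flagOf q) c =
      ((match normC c with | none => q | some d => dedStep q d),
       flagOf (match normC c with | none => q | some d => dedStep q d)) := by
  by_cases h1 : (97 ≤ c.toNat ∧ c.toNat ≤ 122) ∨ c.toNat = 45 ∨ c.toNat = 95
  · have hc : c ≠ '.' := by rintro rfl; revert h1; decide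
    simp [solStep, normC, h1, dedStep, hc, flagOf]
  · by_cases h2 : c.toNat ∈ [48, 49, 50, 51, 52, 53, 54, 55, 56, 57]
    · have hc : c ≠ '.' := by rintro rfl; revert h2; decide
      simp [solStep, normC, h1, h2, dedStep, hc, flagOf]
    · by_cases h3 : 65 ≤ c.toNat ∧ c.toNat ≤ 90
      · have hv : (Char.ofNat (c.toNat + 32)).toNat = c.toNat + 32 := by
          rw [Char.toNat_ofNat]
          have hval : (c.toNat + 32).isValidChar := Or.inl (by omega)
          simp [hval]
        have hc : Char.ofNat (c.toNat + 32) ≠ '.' := by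
          intro e
          have h46 : (Char.ofNat (c.toNat + 32)).toNat = ('.' : Char).toNat := congrArg Char.toNat e
          rw [hv] at h46
          have hd : ('.' : Char).toNat = 46 := rfl
          omega
        simp [solStep, normC, h1, h2, h3, dedStep, hc, flagOf]
      · by_cases h4 : c.toNat = 46
        · have hc : c = '.' := char_eq_dot_of_toNat c h4
          subst hc
          by_cases hq : q.getLast? = some '.'
          · simp [solStep, normC, h1, h2, h3, dedStep, hq, flagOf]
          · simp [solStep, normC, h1, h2, h3, dedStep, hq, flagOf]
        · simp [solStep, normC, h1, h2, h3, h4, flagOf]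

theorem foldA (cs : List Char) : ∀ q : List Char,
    cs.foldl solStep (q, flagOf q) =
      ((cs.filterMap normC).foldl dedStep q,
       flagOf ((cs.filterMap normC).foldl dedStep q)) := by
  induction cs with
  | nil => intro q; rfl
  | cons c cs ih =>
    intro q
    rw [List.foldl_cons, stepA, List.filterMap_cons]
    cases h : normC c with
    | none => simpa [h] using ih q
    | some d => simpa [h] using ih (dedStep q d)

theorem charB (c : Char) :
    (if bKeep (PySem.Chars.lowerChar c) then some (PySem.Chars.lowerChar c) else none) = normC c := by
  by_cases hu : 65 ≤ c.toNat ∧ c.toNat ≤ 90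
  · have hupper : PySem.Chars.isupper c = true := by
      simp [PySem.Chars.isupper, charLe]
      exact hu
    have hv : (Char.ofNat (c.toNat + 32)).toNat = c.toNat + 32 := by
      rw [Char.toNat_ofNat]
      have hval : (c.toNat + 32).isValidChar := Or.inl (by omega)
      simp [hval]
    rw [show PySem.Chars.lowerChar c = Char.ofNat (c.toNat + 32) by
      simp [PySem.Chars.lowerChar, hupper]]
    unfold normC bKeep
    simp only [Bool.or_eq_true, Bool.and_eq_true, decide_eq_true_eq, beq_iff_eq, charLe,
      char_eq_iff_toNat, List.mem_cons, List.not_mem_nil, or_false, hv,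
      show 'a'.toNat = 97 from rfl, show 'z'.toNat = 122 from rfl,
      show '0'.toNat = 48 from rfl, show '9'.toNat = 57 from rfl,
      show '-'.toNat = 45 from rfl, show '_'.toNat = 95 from rfl,
      show '.'.toNat = 46 from rfl]
    split_ifs <;> first | rfl | omega | (exfalso; omega)
  · have hupper : PySem.Chars.isupper c = false := by
      simp [PySem.Chars.isupper, charLe]
      intro h; omega
    have hlc : PySem.Chars.lowerChar c = c := by simp [PySem.Chars.lowerChar, hupper]
    rw [hlc]
    unfold normC bKeep
    simp only [Bool.or_eq_true, Bool.and_eq_true, decide_eq_true_eq, beq_iff_eq, charLe,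
      char_eq_iff_toNat, List.mem_cons, List.not_mem_nil, or_false,
      show 'a'.toNat = 97 from rfl, show 'z'.toNat = 122 from rfl,
      show '0'.toNat = 48 from rfl, show '9'.toNat = 57 from rfl,
      show '-'.toNat = 45 from rfl, show '_'.toNat = 95 from rfl,
      show '.'.toNat = 46 from rfl]
    split_ifs <;> first | rfl | omega | (exfalso; omega)

theorem filterB (l : List Char) :
    (PySem.Chars.lower l).filter bKeep = l.filterMap normC := by
  induction l with
  | nil => rfl
  | cons c cs ih =>
    simp only [PySem.Chars.lower, List.map_cons, List.filter_cons, List.filterMap_cons]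
    have := charB c
    cases hb : bKeep (PySem.Chars.lowerChar c) with
    | true =>
      rw [hb] at this
      simp only [if_pos rfl] at this
      rw [← this]
      simpa using congrArg (PySem.Chars.lowerChar c :: ·) (by simpa [PySem.Chars.lower] using ih)
    | false =>
      rw [hb] at this
      simp only [Bool.false_eq_true, if_false] at this
      rw [← this]
      simpa [PySem.Chars.lower] using ih

theorem zipB (l : List Char) : ∀ (acc : List Char) (p : Char),
    ((acc.getLast? = some '.') ↔ (p = '.')) →
    l.foldl dedStep acc =
      acc ++ ((l.zip (p :: l)).filter (fun cp => !(isDot cp.1) || !(isDot cp.2))).map Prod.fst := by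
  induction l with
  | nil => intro acc p _; simp
  | cons c cs ih =>
    intro acc p hinv
    by_cases hc : c = '.'
    · subst hc
      by_cases hp : p = '.'
      · have hacc : acc.getLast? = some '.' := hinv.mpr hp
        have hstep : dedStep acc '.' = acc := by simp [dedStep, hacc]
        simp only [List.foldl_cons, hstep, List.zip_cons_cons, List.filter_cons]
        rw [if_neg (by simp [isDot, hp])]
        exact ih acc '.' (by simp [hacc])
      · have hacc : acc.getLast? ≠ some '.' := fun h => hp (hinv.mp h)
        have hstep : dedStep acc '.' = acc ++ ['.'] := by simp [dedStep, hacc]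
        simp only [List.foldl_cons, hstep, List.zip_cons_cons, List.filter_cons]
        rw [if_pos (by simp [isDot, hp])]
        rw [ih (acc ++ ['.']) '.' (by simp [List.getLast?_concat])]
        simp
    · have hstep : dedStep acc c = acc ++ [c] := by simp [dedStep, hc]
      simp only [List.foldl_cons, hstep, List.zip_cons_cons, List.filter_cons]
      rw [if_pos (by simp [isDot, hc])]
      rw [ih (acc ++ [c]) c (by simp [List.getLast?_concat, hc])]
      simp

theorem noDD_fold (cs : List Char) : ∀ acc, NoDD acc → NoDD (cs.foldl dedStep acc) := by
  induction cs with
  | nil => intro acc h; exact h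
  | cons c cs ih =>
    intro acc h
    rw [List.foldl_cons]
    apply ih
    unfold dedStep
    split_ifs with hcond
    · exact h
    · rw [NoDD, List.isChain_append]
      refine ⟨h, by simp, ?_⟩
      intro x hx y hy
      simp at hy
      subst hy
      rintro ⟨hx', hy'⟩
      exact hcond ⟨hy', by rwa [hx'] at hx⟩

theorem lstrip_eq (D : List Char) (h : NoDD D) :
    D.dropWhile isDot = if D.head? = some '.' then D.tail else D := by
  cases D with
  | nil => simp
  | cons a as =>
    by_cases ha : a = '.'
    · subst ha
      cases as with
      | nil => simp [List.dropWhile, isDot]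
      | cons b bs =>
        have hb : b ≠ '.' := by
          rw [NoDD, List.isChain_cons_cons] at h
          exact fun e => h.1 ⟨rfl, e⟩
        simp [List.dropWhile_cons, isDot, hb]
    · simp [List.dropWhile_cons, isDot, ha]

theorem noDD_reverse (D : List Char) (h : NoDD D) : NoDD D.reverse := by
  rw [NoDD, List.isChain_reverse]
  exact List.IsChain.imp (fun a b hab hh => hab ⟨hh.2, hh.1⟩) h

theorem getLast?_cons_ne (a : Char) (l : List Char) (h : l ≠ []) :
    (a :: l).getLast? = l.getLast? := by
  cases l with
  | nil => exact absurd rfl h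
  | cons b bs => simp [List.getLast?_cons_cons]

theorem rstrip_eq (D : List Char) (h : NoDD D) :
    (D.reverse.dropWhile isDot).reverse = if D.getLast? = some '.' then D.dropLast else D := by
  rw [lstrip_eq D.reverse (noDD_reverse D h), List.head?_reverse]
  split_ifs with hl
  · rw [List.tail_reverse, List.reverse_reverse]
  · rw [List.reverse_reverse]

theorem post_comm (D : List Char) (h : NoDD D) :
    (if (if D.getLast? = some '.' then D.dropLast else D).head? = some '.'
     then (if D.getLast? = some '.' then D.dropLast else D).tail
     else (if D.getLast? = some '.' then D.dropLast else D))
    = ((D.dropWhile isDot).reverse.dropWhile isDot).reverse := by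
  have hstail : NoDD D.tail := by
    cases D with
    | nil => exact h
    | cons a as => exact (List.isChain_cons.mp h).2
  rw [lstrip_eq D h]
  by_cases hH : D.head? = some '.'
  · rw [if_pos hH, rstrip_eq D.tail hstail]
    cases D with
    | nil => simp at hH
    | cons a as =>
      simp only [List.head?_cons, Option.some_inj] at hH
      subst hH
      simp only [List.tail_cons]
      by_cases hL : ('.' :: as).getLast? = some '.'
      · cases as with
        | nil => simp
        | cons b bs =>
          have hL' : (b :: bs).getLast? = some '.' := by
            rwa [getLast?_cons_ne _ _ (by simp)] at hL
          rw [if_pos hL', if_pos hL]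
          rw [List.dropLast_cons_of_ne_nil (by simp)]
          have hb : b ≠ '.' := by
            rw [NoDD, List.isChain_cons_cons] at h
            exact fun e => h.1 ⟨rfl, e⟩
          cases bs with
          | nil => simp only [List.getLast?_singleton, Option.some_inj] at hL'; exact absurd hL' hb
          | cons d ds =>
            rw [List.dropLast_cons_of_ne_nil (by simp)]
            simp [List.head?_cons, hb]
      · cases as with
        | nil => simp at hL
        | cons b bs =>
          have hL' : (b :: bs).getLast? ≠ some '.' := by
            rwa [getLast?_cons_ne _ _ (by simp)] at hL
          rw [if_neg hL', if_neg hL]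
          have hb : b ≠ '.' := by
            rw [NoDD, List.isChain_cons_cons] at h
            exact fun e => h.1 ⟨rfl, e⟩
          simp [List.head?_cons, hb]
  · rw [if_neg hH, rstrip_eq D h]
    by_cases hL : D.getLast? = some '.'
    · rw [if_pos hL]
      cases D with
      | nil => simp at hL
      | cons a as =>
        cases as with
        | nil =>
          simp only [List.getLast?_singleton, Option.some_inj] at hL
          simp [hL] at hH
        | cons b bs =>
          rw [List.dropLast_cons_of_ne_nil (by simp)]
          simp only [List.head?_cons] at hH ⊢
          rw [if_neg hH]
    · rw [if_neg hL, if_neg hH]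

theorem noDD_dropLast (D : List Char) (h : NoDD D) : NoDD D.dropLast :=
  List.IsChain.prefix h (List.dropLast_prefix D)

theorem noDD_take (n : Nat) (D : List Char) (h : NoDD D) : NoDD (D.take n) :=
  List.IsChain.prefix h (List.take_prefix n D)

theorem noDD_tail (D : List Char) (h : NoDD D) : NoDD D.tail := by
  cases D with
  | nil => exact h
  | cons a as => exact (List.isChain_cons.mp h).2

theorem rstrip_no_lastDot (C : List Char) (h : NoDD C) :
    ((C.reverse.dropWhile isDot).reverse).getLast? ≠ some '.' := by
  rw [rstrip_eq C h]
  by_cases hL : C.getLast? = some '.'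
  · rw [if_pos hL]
    intro hbad
    have hne : C ≠ [] := by rintro rfl; simp at hL
    have hdec := List.dropLast_concat_getLast hne
    have hlast : C.getLast hne = '.' := by
      have := List.getLast?_eq_some_getLast hne
      rw [hL] at this
      exact (Option.some_inj.mp this.symm)
    rw [NoDD, ← hdec, List.isChain_append] at h
    have := h.2.2
    rw [hlast] at this
    rcases hx : C.dropLast.getLast? with _ | x
    · rw [hx] at hbad; simp at hbad
    · rw [hx] at hbad
      have hxd : x = '.' := Option.some_inj.mp hbad
      exact this x (by rw [hx]; rfl) '.' (by simp) ⟨hxd, rfl⟩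
  · rw [if_neg hL]; exact hL

theorem noDD_rstrip (C : List Char) (h : NoDD C) :
    NoDD ((C.reverse.dropWhile isDot).reverse) := by
  rw [rstrip_eq C h]
  split_ifs
  · exact noDD_dropLast C h
  · exact h

theorem trunc_eq (E : List Char) (h : NoDD E) (hl : E.getLast? ≠ some '.') :
    (if 16 ≤ E.length then
       (if PySem.List.pyGet? (E.take 15) (14 : Int) = some '.' then (E.take 15).dropLast else E.take 15)
     else E)
    = ((E.take 15).reverse.dropWhile isDot).reverse := by
  by_cases hlen : 16 ≤ E.length
  · rw [if_pos hlen]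
    have htl : (E.take 15).length = 15 := by rw [List.length_take]; omega
    have hget : PySem.List.pyGet? (E.take 15) (14 : Int) = (E.take 15).getLast? := by
      rw [List.getLast?_eq_getElem?, htl]
      simp [PySem.List.pyGet?, PySem.List.pyIdx?, htl]
    rw [hget, rstrip_eq (E.take 15) (noDD_take 15 E h)]
  · rw [if_neg hlen]
    have ht : E.take 15 = E := List.take_of_length_le (by omega)
    rw [ht, rstrip_eq E h, if_neg hl]

theorem padLoop_one (a : Char) : padLoop [a] = [a, a, a] := by simp [padLoop]

theorem padLoop_two (a b : Char) : padLoop [a, b] = [a, b, b] := by simp [padLoop]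

theorem padLoop_ge3 (a b c : Char) (t : List Char) : padLoop (a :: b :: c :: t) = a :: b :: c :: t := by
  rw [padLoop]
  simp

theorem pad_eq (l : List Char) :
    padLoop l = l ++ (match l.getLast? with | some c => List.replicate (3 - l.length) c | none => []) := by
  match l with
  | [] => rw [padLoop]; simp
  | [a] => rw [padLoop_one]; simp [List.replicate]
  | [a, b] => rw [padLoop_two]; simp [List.getLast?_cons_cons, List.replicate]
  | a :: b :: c :: t =>
    rw [padLoop_ge3]
    have h0 : 3 - (a :: b :: c :: t).length = 0 := by simp
    rw [h0]
    rcases hx : (a :: b :: c :: t).getLast? with _ | x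
    · simp at hx
    · simp

-- condition of A's first pop equals "the queue ends in a dot"
theorem cond_iff (D : List Char) : (D ≠ [] ∧ flagOf D = 0) ↔ D.getLast? = some '.' := by
  unfold flagOf
  constructor
  · rintro ⟨hne, hf⟩
    by_contra hq
    simp [hq] at hf
  · intro hq
    refine ⟨?_, by simp [hq]⟩
    rintro rfl
    simp at hq

-- ===== VERDICT (by name: the statement is the Claim_ definition above) =====
theorem solution_spec : Claim_equal_solution := by
  unfold Claim_equal_solution Spec_solution
  intro new_id _
  unfold solution solution_alt
  simp only []
  -- identify both first stages with D := foldl dedStep [] (filterMap normC ...)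
  have hflag0 : (1 : Int) = flagOf ([] : List Char) := by simp [flagOf]
  rw [hflag0, foldA]
  set L := new_id.toList.filterMap normC with hLdef
  set D := L.foldl dedStep [] with hDdef
  have hND : NoDD D := noDD_fold L [] (by simp [NoDD])
  have hBfilter : (PySem.Str.lower new_id).toList.filter bKeep = L := by
    rw [PySem.Str.toList_lower]
    exact filterB new_id.toList
  rw [hBfilter]
  have hBzip : ((L.zip (Char.ofNat 0 :: L)).filter (fun cp => !(isDot cp.1) || !(isDot cp.2))).map Prod.fst = D := by
    have := zipB L [] (Char.ofNat 0) (by simp)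
    rw [List.nil_append] at this
    exact this.symm
  rw [hBzip]
  -- strips: A pops back then front, B drops front then back; equal by post_comm
  rw [if_congr (cond_iff D) rfl rfl]
  rw [post_comm D hND]
  set S := ((D.dropWhile isDot).reverse.dropWhile isDot).reverse with hSdef
  set E := if S = [] then ['a'] else S with hEdef
  have hNE : NoDD E := by
    rw [hEdef]
    split_ifs
    · simp [NoDD]
    · rw [hSdef]
      exact noDD_rstrip _ (by rw [lstrip_eq D hND]; split_ifs; exacts [noDD_tail D hND, hND])
  have hlE : E.getLast? ≠ some '.' := by
    rw [hEdef]
    split_ifs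
    · decide
    · rw [hSdef]
      exact rstrip_no_lastDot _ (by rw [lstrip_eq D hND]; split_ifs; exacts [noDD_tail D hND, hND])
  rw [trunc_eq E hNE hlE]
  rw [pad_eq]
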